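-- pv_equiv track=rewrite | github.com/ColdCode0214/LeetCode_local | OA/Amazon OA/OA-35.py | oa1t35
-- ===== SOURCE A (Python) =====
-- from typing import List
--
-- def oa1t35(memory: List[int], k: int) -> int:
--     sum_memory = sum(memory)
--     subsum, pre = sum(memory[0:k]), sum(memory[0:k])
--     n = len(memory)
--     for i in range(0,n-k):
--         pre += (memory[i+k]-memory[i])
--         subsum = max(subsum, pre)
--     return sum_memory-subsum
-- ===== SOURCE B (Python) =====
-- def oa1t35(memory, k):
--     n = len(memory)
--     best = sum(memory[0:k])
--     for i in range(1, n - k + 1):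
--         best = max(best, sum(memory[i:i + k]))
--     return sum(memory) - best
-- ===== Notes on version B (the rewrite author's own statement) =====
-- stated objective: simpler
-- what changed: Replaces A's incremental sliding-window update (pre += memory[i+k]-memory[i]) with a direct recomputation of each window's sum via a slice, taking the max over all window starts.
-- outside the precondition, e.g. on oa1t35([1, 2, 3], -1): A raises IndexError, B returns 3
import Mathlib
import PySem

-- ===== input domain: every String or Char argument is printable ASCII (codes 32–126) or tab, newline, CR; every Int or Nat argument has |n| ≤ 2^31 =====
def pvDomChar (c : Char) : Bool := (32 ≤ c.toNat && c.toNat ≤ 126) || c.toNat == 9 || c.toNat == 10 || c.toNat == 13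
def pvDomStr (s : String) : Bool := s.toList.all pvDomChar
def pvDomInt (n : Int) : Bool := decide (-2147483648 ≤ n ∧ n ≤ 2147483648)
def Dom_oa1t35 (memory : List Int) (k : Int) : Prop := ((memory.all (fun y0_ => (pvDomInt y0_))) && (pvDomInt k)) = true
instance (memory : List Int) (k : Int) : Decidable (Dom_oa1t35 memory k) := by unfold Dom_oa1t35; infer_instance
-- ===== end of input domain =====

-- B replaces A's incremental sliding-window update with a direct recomputation of each window's sum (objective: simpler/alternative, not faster).

-- ===== PORT A =====
def oa1t35 (memory : List Int) (k : Int) : Int :=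
  let sum_memory := memory.sum
  let subsum := (PySem.List.slice memory (some 0) (some k)).sum
  let pre := subsum
  let n : Int := memory.length
  let st := (PySem.List.pyRange 0 (n - k) 1).foldl
    (fun (st : Int × Int) i =>
      let pre := st.2 + (PySem.List.pyGetD memory (i + k) 0 - PySem.List.pyGetD memory i 0)
      (max st.1 pre, pre))
    (subsum, pre)
  sum_memory - st.1

-- ===== PORT B =====
def oa1t35_alt (memory : List Int) (k : Int) : Int :=
  let n : Int := memory.length
  let best := (PySem.List.slice memory (some 0) (some k)).sum
  let best := (PySem.List.pyRange 1 (n - k + 1) 1).foldl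
    (fun b i => max b (PySem.List.slice memory (some i) (some (i + k))).sum)
    best
  memory.sum - best

-- ===== PRECONDITION & SPEC =====
-- Pre_ excludes k < 0, on which Python A always raises IndexError (memory[i] with i ≥ len, or memory[i+k] on an empty list).
def Pre_oa1t35 (memory : List Int) (k : Int) : Prop := 0 ≤ k
instance (memory : List Int) (k : Int) : Decidable (Pre_oa1t35 memory k) := by unfold Pre_oa1t35; infer_instance
def pvWitness_oa1t35 : List Int × Int := ([3, -1, 4, 1, 5], 2)

def Spec_oa1t35 (memory : List Int) (k : Int) (out : Int) : Prop := out = oa1t35_alt memory k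
instance (memory : List Int) (k : Int) (out : Int) : Decidable (Spec_oa1t35 memory k out) := by unfold Spec_oa1t35; infer_instance

-- ===== CLAIM (what is proved, stated in full; the proofs are below) =====
def Claim_equal_oa1t35 : Prop := ∀ (memory : List Int) (k : Int), Dom_oa1t35 memory k → Pre_oa1t35 memory k → Spec_oa1t35 memory k (oa1t35 memory k)

-- ===== LEMMAS AND PROOFS =====

-- prefix-sum step: sum of the first j+1 elements
theorem pv_sum_take_succ (memory : List Int) (j : Nat) (h : j < memory.length) :
    (memory.take (j + 1)).sum = (memory.take j).sum + memory.getD j 0 := by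
  rw [List.take_succ, List.sum_append, List.getElem?_eq_getElem h]
  simp [List.getD_eq_getElem?_getD, List.getElem?_eq_getElem h]

-- window sum as a difference of prefix sums (no side condition)
theorem pv_window_eq (memory : List Int) (i K : Nat) :
    ((memory.drop i).take K).sum = (memory.take (i + K)).sum - (memory.take i).sum := by
  have hsum : (memory.take (i + K)).sum = (memory.take i).sum + ((memory.drop i).take K).sum := by
    rw [List.take_add, List.sum_append]
  omega

-- sliding-window step
theorem pv_Wstep (memory : List Int) (K m : Nat) (h : m + K < memory.length) :
    ((memory.drop (m + 1)).take K).sum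
      = ((memory.drop m).take K).sum + memory.getD (m + K) 0 - memory.getD m 0 := by
  have h1 := pv_window_eq memory (m + 1) K
  have h2 := pv_window_eq memory m K
  have h3 := pv_sum_take_succ memory (m + K) h
  have h4 := pv_sum_take_succ memory m (by omega)
  have e : m + 1 + K = m + K + 1 := by omega
  rw [e] at h1
  omega

-- joint invariant of A's incremental fold and B's recomputing fold
theorem pv_main (memory : List Int) (K : Nat) :
    ∀ (m : Nat), m + K ≤ memory.length →
    (PySem.List.pyRange 0 (m : Int) 1).foldl
      (fun (st : Int × Int) i =>
        (max st.1 (st.2 + (PySem.List.pyGetD memory (i + (K : Int)) 0 - PySem.List.pyGetD memory i 0)),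
         st.2 + (PySem.List.pyGetD memory (i + (K : Int)) 0 - PySem.List.pyGetD memory i 0)))
      ((memory.take K).sum, (memory.take K).sum)
    = ((PySem.List.pyRange 1 ((m : Int) + 1) 1).foldl
        (fun b i => max b (PySem.List.slice memory (some i) (some (i + (K : Int)))).sum)
        (memory.take K).sum,
       ((memory.drop m).take K).sum) := by
  intro m
  induction m with
  | zero =>
    intro _
    simp [PySem.List.pyRange_one_eq_nil]
  | succ m ih =>
    intro hm
    have hm' : m + K ≤ memory.length := by omega
    have hcast : ((m + 1 : Nat) : Int) = (m : Int) + 1 := by push_cast; ring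
    rw [hcast,
        PySem.List.pyRange_one_succ_right (a := 0) (b := (m : Int)) (by omega),
        PySem.List.pyRange_one_succ_right (a := 1) (b := (m : Int) + 1) (by omega),
        List.foldl_append, List.foldl_append, ih hm']
    simp only [List.foldl_cons, List.foldl_nil]
    have hget1 : PySem.List.pyGetD memory ((m : Int) + (K : Int)) 0 = memory.getD (m + K) 0 := by
      rw [show ((m : Int) + (K : Int)) = ((m + K : Nat) : Int) by push_cast; ring,
          PySem.List.pyGetD_natCast]
    have hget2 : PySem.List.pyGetD memory (m : Int) 0 = memory.getD m 0 := by
      rw [PySem.List.pyGetD_natCast]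
    have hslice : PySem.List.slice memory (some ((m : Int) + 1)) (some ((m : Int) + 1 + (K : Int)))
        = (memory.drop (m + 1)).take K := by
      rw [show ((m : Int) + 1) = ((m + 1 : Nat) : Int) by push_cast; ring]
      exact PySem.List.slice_natCast_add memory (m + 1) K
    have hw := pv_Wstep memory K m (by omega)
    simp only [hget1, hget2, hslice]
    rw [show ((memory.drop m).take K).sum + (memory.getD (m + K) 0 - memory.getD m 0)
          = ((memory.drop (m + 1)).take K).sum by omega]

-- ===== VERDICT (by name: the statement is the Claim_ definition above) =====
theorem oa1t35_spec : Claim_equal_oa1t35 := by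
  intro memory k _ hk
  unfold Spec_oa1t35 oa1t35 oa1t35_alt
  simp only []
  obtain ⟨K, rfl⟩ : ∃ K : Nat, k = (K : Int) := ⟨k.toNat, (Int.toNat_of_nonneg hk).symm⟩
  by_cases hn : memory.length < K
  · -- k > n: both loops are empty
    rw [PySem.List.pyRange_one_eq_nil (by omega),
        PySem.List.pyRange_one_eq_nil (by omega)]
    simp
  · replace hn : K ≤ memory.length := by omega
    set M : Nat := memory.length - K with hM
    have h1 : ((memory.length : Int) - (K : Int)) = (M : Int) := by omega
    have h2 : ((memory.length : Int) - (K : Int) + 1) = (M : Int) + 1 := by omega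
    have hsl : PySem.List.slice memory (some 0) (some (K : Int)) = memory.take K := by
      simp [PySem.List.slice_to_natCast]
    rw [h1, hsl, pv_main memory K M (by omega)]
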